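-- pv_equiv track=rewrite | github.com/rish664/pipeshub-ai | backend/python/app/connectors/sources/nextcloud/connector.py | _sort_entries_by_hierarchy
-- ===== SOURCE A (Python) =====
-- from typing import AsyncGenerator, Dict, List, NoReturn, Optional, Tuple
--
-- def get_path_depth(path: str) -> int:
--     """Calculate the depth of a path (number of directory levels)."""
--     if not path or path == "/":
--         return 0
--     return len([p for p in path.strip("/").split("/") if p])
--
-- def _sort_entries_by_hierarchy(entries: List[Dict]) -> List[Dict]:
--     """
--     Sort entries so folders are processed before their contents.
--     This ensures parent records exist before children reference them.
--     Args:
--         entries: List of file/folder entries from WebDAV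
--     Returns:
--         Sorted list with folders first, then files, ordered by depth
--     """
--     # Separate folders and files
--     folders = []
--     files = []
--
--     for entry in entries:
--         if entry.get('is_collection'):
--             folders.append(entry)
--         else:
--             files.append(entry)
--
--     # Sort folders by depth (shallowest first)
--     folders.sort(key=lambda e: get_path_depth(e.get('path', '')))
--
--     # Sort files by depth (shallowest first)
--     files.sort(key=lambda e: get_path_depth(e.get('path', '')))
--
--     # Return folders first, then files
--     return folders + files
-- ===== SOURCE B (Python) =====
-- from typing import Dict, List
--
--
-- def get_path_depth(path: str) -> int:
--     """Calculate the depth of a path (number of directory levels)."""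
--     if not path or path == "/":
--         return 0
--     return len([p for p in path.strip("/").split("/") if p])
--
--
-- def _sort_entries_by_hierarchy(entries: List[Dict]) -> List[Dict]:
--     """Bucket scan instead of comparison sorting: folders then files, and within each
--     group emit entries depth level by depth level (0, 1, ..., max depth), preserving
--     original order inside a level. No sort() call at all."""
--     folders = [e for e in entries if e.get('is_collection')]
--     files = [e for e in entries if not e.get('is_collection')]
--     out = []
--     for group in (folders, files):
--         depths = [get_path_depth(e.get('path', '')) for e in group]
--         bound = max(depths) + 1 if depths else 0
--         for d in range(bound):
--             out.extend(e for e, dd in zip(group, depths) if dd == d)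
--     return out
-- ===== Notes on version B (the rewrite author's own statement) =====
-- stated objective: alternative
-- what changed: Replaces the two comparison sorts (partition, folders.sort, files.sort, concatenate) with a sort-free bucket scan: for each group it computes every entry's depth once, then sweeps depth levels 0..max and emits the entries of each level in original order.
import Mathlib
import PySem

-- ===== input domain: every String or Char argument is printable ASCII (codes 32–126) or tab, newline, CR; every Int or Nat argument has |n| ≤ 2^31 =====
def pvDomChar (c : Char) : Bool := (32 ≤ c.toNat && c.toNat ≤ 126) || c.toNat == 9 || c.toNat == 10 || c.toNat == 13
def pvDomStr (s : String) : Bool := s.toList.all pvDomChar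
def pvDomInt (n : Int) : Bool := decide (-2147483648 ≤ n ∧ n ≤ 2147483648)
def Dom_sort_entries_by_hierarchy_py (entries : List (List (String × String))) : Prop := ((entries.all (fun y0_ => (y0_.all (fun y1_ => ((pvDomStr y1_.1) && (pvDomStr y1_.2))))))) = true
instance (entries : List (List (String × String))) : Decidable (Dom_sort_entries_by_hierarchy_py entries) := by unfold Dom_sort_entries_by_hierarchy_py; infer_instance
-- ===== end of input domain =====

-- B replaces A's partition + two comparison sorts with a sort-free bucket scan
-- (emit each group depth level by depth level) — an alternative algorithm, same value.

-- ===== PORT A =====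
-- shared helper: dict.get(k, d) on the association list (first match)
def pvGetD (e : List (String × String)) (k d : String) : String :=
  match e.find? (fun kv => kv.1 == k) with
  | some kv => kv.2
  | none => d

-- shared helper: truthiness of entry.get('is_collection') (None / '' are falsy)
def pvIsColl (e : List (String × String)) : Bool :=
  match e.find? (fun kv => kv.1 == "is_collection") with
  | some kv => kv.2 != ""
  | none => false

-- shared helper: get_path_depth (verbatim from the module, used by both Pythons)
def get_path_depth (path : String) : Int :=
  if path = "" || path = "/" then 0
  else ((PySem.Chars.splitOn (PySem.Str.stripChars path "/").toList ['/']).filter (fun p => p ≠ [])).length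

def sort_entries_by_hierarchy_py (entries : List (List (String × String))) : List (List (String × String)) :=
  let pair := entries.foldl
    (fun (acc : List (List (String × String)) × List (List (String × String))) entry =>
      if pvIsColl entry then (acc.1 ++ [entry], acc.2) else (acc.1, acc.2 ++ [entry]))
    ([], [])
  let folders := PySem.List.sorted pair.1 (fun e => get_path_depth (pvGetD e "path" ""))
  let files := PySem.List.sorted pair.2 (fun e => get_path_depth (pvGetD e "path" ""))
  folders ++ files

-- ===== PORT B =====
-- depth key of an entry (B computes it once per entry into 'depths')
def pvDepth (e : List (String × String)) : Int := get_path_depth (pvGetD e "path" "")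

-- one group of B's 'for group in (folders, files)' body: the depth-level sweep
def pvBucketPass (group : List (List (String × String))) : List (List (String × String)) :=
  let depths := group.map pvDepth
  let bound : Int :=
    match PySem.List.max? depths (fun x => x) with
    | some m => m + 1
    | none => 0
  (PySem.List.pyRange 0 bound 1).foldl
    (fun acc d => acc ++ ((group.zip depths).filter (fun p => p.2 == d)).map Prod.fst) []

def sort_entries_by_hierarchy_py_alt (entries : List (List (String × String))) : List (List (String × String)) :=
  let folders := entries.filter (fun e => pvIsColl e)
  let files := entries.filter (fun e => !pvIsColl e)
  pvBucketPass folders ++ pvBucketPass files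

-- ===== PRECONDITION & SPEC =====
def Spec_sort_entries_by_hierarchy_py (entries : List (List (String × String))) (out : List (List (String × String))) : Prop := out = sort_entries_by_hierarchy_py_alt entries
instance (entries : List (List (String × String))) (out : List (List (String × String))) : Decidable (Spec_sort_entries_by_hierarchy_py entries out) := by unfold Spec_sort_entries_by_hierarchy_py; infer_instance

-- ===== CLAIM (what is proved, stated in full; the proofs are below) =====
def Claim_equal_sort_entries_by_hierarchy_py : Prop := ∀ (entries : List (List (String × String))), Dom_sort_entries_by_hierarchy_py entries → Spec_sort_entries_by_hierarchy_py entries (sort_entries_by_hierarchy_py entries)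

-- ===== LEMMAS AND PROOFS =====

-- depths are never negative (a length, or 0)
theorem pvDepth_nonneg (e : List (String × String)) : 0 ≤ pvDepth e := by
  unfold pvDepth get_path_depth
  split <;> simp

-- zip with the mapped keys, filter on the key component, project back = plain filter
theorem zip_map_filter_fst {α : Type} (key : α → Int) (xs : List α) (d : Int) :
    (((xs.zip (xs.map key)).filter (fun p => p.2 == d)).map Prod.fst)
      = xs.filter (fun e => key e == d) := by
  induction xs with
  | nil => rfl
  | cons x t ih =>
    by_cases hx : key x = d
    · simp [hx, ih]
    · simp [hx, ih]

-- insertBy passes over a prefix it never goes before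
theorem insertBy_append_right {α : Type} (before : α → α → Bool) (x : α) (A B : List α)
    (h : ∀ a ∈ A, before x a = false) :
    PySem.List.insertBy before x (A ++ B) = A ++ PySem.List.insertBy before x B := by
  induction A with
  | nil => simp
  | cons a as ih =>
    simp only [List.cons_append, PySem.List.insertBy, h a (by simp)]
    simp [ih (fun a ha => h a (by simp [ha]))]

-- insertBy goes straight to the front when it goes before everything
theorem insertBy_cons_of_forall {α : Type} (before : α → α → Bool) (x : α) (B : List α)
    (h : ∀ b ∈ B, before x b = true) :
    PySem.List.insertBy before x B = x :: B := by
  cases B with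
  | nil => rfl
  | cons b bs => simp [PySem.List.insertBy, h b (by simp)]

-- the level sweep over [0, b) is the stable sort by key, for any b above every key
theorem flatMap_levels_eq_sorted {α : Type} (key : α → Int) (xs : List α) (b : Int)
    (h : ∀ e ∈ xs, 0 ≤ key e ∧ key e < b) :
    (PySem.List.pyRange 0 b 1).flatMap (fun d => xs.filter (fun e => key e == d))
      = PySem.List.sorted xs key false := by
  induction xs using List.reverseRecOn with
  | nil => simp [PySem.List.sorted_eq_foldl_insertBy, List.flatMap_eq_nil_iff]
  | append_singleton xs x ih =>
    obtain ⟨hx0, hxb⟩ := h x (by simp)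
    have hsplit := PySem.List.pyRange_one_append 0 (key x + 1) b (by omega) (by omega)
    have hsucc := PySem.List.pyRange_one_succ_right hx0
    have hfilt : ∀ d, (xs ++ [x]).filter (fun e => key e == d)
        = xs.filter (fun e => key e == d) ++ (if key x = d then [x] else []) := by
      intro d; by_cases hd : key x = d <;> simp [List.filter_append, hd]
    have hih := ih (fun e he => h e (by simp [he]))
    calc (PySem.List.pyRange 0 b 1).flatMap (fun d => (xs ++ [x]).filter (fun e => key e == d))
        = (PySem.List.pyRange 0 (key x) 1).flatMap (fun d => (xs ++ [x]).filter (fun e => key e == d))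
          ++ (xs ++ [x]).filter (fun e => key e == key x)
          ++ (PySem.List.pyRange (key x + 1) b 1).flatMap (fun d => (xs ++ [x]).filter (fun e => key e == d)) := by
            rw [hsplit, hsucc]; simp [List.flatMap_append]
      _ = (PySem.List.pyRange 0 (key x) 1).flatMap (fun d => xs.filter (fun e => key e == d))
          ++ (xs.filter (fun e => key e == key x) ++ [x])
          ++ (PySem.List.pyRange (key x + 1) b 1).flatMap (fun d => xs.filter (fun e => key e == d)) := by
            congr 1
            · congr 1
              · apply List.flatMap_congr; intro d hd
                have := (PySem.List.mem_pyRange_one.mp hd).2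
                rw [hfilt d]; simp [show key x ≠ d by omega]
              · rw [hfilt (key x)]; simp
            · apply List.flatMap_congr; intro d hd
              have := (PySem.List.mem_pyRange_one.mp hd).1
              rw [hfilt d]; simp [show key x ≠ d by omega]
      _ = PySem.List.sorted (xs ++ [x]) key false := by
            have hL := (PySem.List.pyRange_one_append 0 (key x + 1) b (by omega) (by omega))
            have base : (PySem.List.pyRange 0 b 1).flatMap (fun d => xs.filter (fun e => key e == d))
                = ((PySem.List.pyRange 0 (key x) 1).flatMap (fun d => xs.filter (fun e => key e == d))
                    ++ xs.filter (fun e => key e == key x))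
                  ++ (PySem.List.pyRange (key x + 1) b 1).flatMap (fun d => xs.filter (fun e => key e == d)) := by
              rw [hL, hsucc]; simp [List.flatMap_append]
            have hsortapp : PySem.List.sorted (xs ++ [x]) key false
                = PySem.List.insertBy (fun a b => decide (key a < key b)) x
                    (PySem.List.sorted xs key false) := by
              rw [PySem.List.sorted_eq_foldl_insertBy, PySem.List.sorted_eq_foldl_insertBy]
              simp
            rw [hsortapp, ← hih, base]
            rw [insertBy_append_right]
            · rw [insertBy_cons_of_forall]
              · simp
              · intro e he
                obtain ⟨d, hd, hef⟩ := List.mem_flatMap.mp he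
                have hlo := (PySem.List.mem_pyRange_one.mp hd).1
                have : key e = d := by simpa using (List.mem_filter.mp hef).2
                simp; omega
            · intro e he
              rcases List.mem_append.mp he with he | he
              · obtain ⟨d, hd, hef⟩ := List.mem_flatMap.mp he
                have hhi := (PySem.List.mem_pyRange_one.mp hd).2
                have : key e = d := by simpa using (List.mem_filter.mp hef).2
                simp; omega
              · have : key e = key x := by simpa using (List.mem_filter.mp he).2
                simp; omega

-- B's one-group sweep equals Python's stable sort of that group by depth
theorem bucketPass_eq_sorted (group : List (List (String × String))) :
    pvBucketPass group = PySem.List.sorted group pvDepth false := by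
  unfold pvBucketPass
  simp only [PySem.List.foldl_append_eq_flatMap, List.nil_append]
  have hz : ∀ d, (((group.zip (group.map pvDepth)).filter (fun p => p.2 == d)).map Prod.fst)
      = group.filter (fun e => pvDepth e == d) := fun d => zip_map_filter_fst pvDepth group d
  cases hm : PySem.List.max? (group.map pvDepth) (fun x => x) with
  | none =>
    have : group = [] := by
      have := (PySem.List.max?_eq_none_iff _ _).mp hm
      simpa using this
    subst this; rfl
  | some m =>
    simp only [hz]
    apply flatMap_levels_eq_sorted
    intro e he
    refine ⟨pvDepth_nonneg e, ?_⟩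
    have := PySem.List.max?_isMax hm (pvDepth e) (List.mem_map_of_mem he)
    omega

-- A's partition loop is filter twice
theorem partition_fold_eq (xs : List (List (String × String)))
    (acc : List (List (String × String)) × List (List (String × String))) :
    xs.foldl
      (fun acc entry =>
        if pvIsColl entry then (acc.1 ++ [entry], acc.2) else (acc.1, acc.2 ++ [entry])) acc
      = (acc.1 ++ xs.filter pvIsColl, acc.2 ++ xs.filter (fun e => !pvIsColl e)) := by
  induction xs generalizing acc with
  | nil => simp
  | cons x xs ih =>
    by_cases hx : pvIsColl x = true
    · simp [hx, ih]
    · simp only [Bool.not_eq_true] at hx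
      simp [hx, ih]

-- ===== VERDICT (by name: the statement is the Claim_ definition above) =====
theorem sort_entries_by_hierarchy_py_spec : Claim_equal_sort_entries_by_hierarchy_py := by
  intro entries _
  show sort_entries_by_hierarchy_py entries = sort_entries_by_hierarchy_py_alt entries
  simp only [sort_entries_by_hierarchy_py, sort_entries_by_hierarchy_py_alt,
    partition_fold_eq, bucketPass_eq_sorted, List.nil_append]
  rfl
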